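-- pv_equiv track=rewrite | github.com/BaeJunH0/Algorithm_practice | 프로그래머스/1/135808. 과일 장수/과일 장수.py | solution
-- ===== SOURCE A (Python) =====
-- def solution(k, m, score):
--     answer = 0
--     score.sort(reverse = True)
--     temp = []
--     for i in range(len(score)):
--         temp.append(score[i])
--         if (i + 1) % m == 0:
--             answer += min(temp) * m
--             temp = []
--     return answer
-- ===== SOURCE B (Python) =====
-- def solution(k, m, score):
--     score.sort(reverse=True)
--     return m * sum(score[m-1::m])
-- ===== Notes on version B (the rewrite author's own statement) =====
-- stated objective: faster
-- what changed: A buffers every element into a temp list and calls min() at each m-th boundary; B reads each full group's minimum directly as its last element via the strided slice score[m-1::m] and returns m times its sum, skipping the per-element buffering and min scans.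
-- outside the precondition, e.g. on solution(0, -2, [3, 1, 5, 2]): A returns -8, B returns -6; on solution(0, 0, []): A returns 0, B raises ValueError
import Mathlib
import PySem

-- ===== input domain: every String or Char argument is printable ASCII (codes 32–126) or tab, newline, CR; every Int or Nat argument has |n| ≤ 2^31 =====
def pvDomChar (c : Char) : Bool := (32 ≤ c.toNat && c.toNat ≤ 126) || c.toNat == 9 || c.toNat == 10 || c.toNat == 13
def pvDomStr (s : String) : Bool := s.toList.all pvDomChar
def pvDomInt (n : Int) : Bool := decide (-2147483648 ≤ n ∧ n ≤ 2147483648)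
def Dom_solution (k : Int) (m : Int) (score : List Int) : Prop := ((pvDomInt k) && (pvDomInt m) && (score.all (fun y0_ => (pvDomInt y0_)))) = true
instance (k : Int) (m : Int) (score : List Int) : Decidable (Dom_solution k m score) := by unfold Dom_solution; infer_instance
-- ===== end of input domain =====

-- ===== PORT A =====
-- B replaces A's per-element buffer + min with a strided slice (simpler decomposition).
-- Both A and B sort `score` in place (same observable mutation); the equivalence proved is about the return value.
def solution (k : Int) (m : Int) (score : List Int) : Int :=
  -- answer = 0; score.sort(reverse=True); temp = []
  -- for i in range(len(score)): temp.append(score[i]); if (i+1) % m == 0: answer += min(temp)*m; temp = []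
  let score := PySem.List.sorted score (fun x => x) true
  let st := (PySem.List.pyRange 0 score.length 1).foldl
    (fun (st : Int × List Int) i =>
      -- st.2 ++ [score[i]] is temp after temp.append(score[i]); i ∈ range(len(score)) is always in range
      if PySem.Int.mod (i + 1) m = 0 then
        -- min(temp): temp just received score[i], so it is nonempty; the .getD 0 default is unreachable
        (st.1 + (PySem.List.min? (st.2 ++ [PySem.List.pyGetD score i 0]) (fun x => x)).getD 0 * m,
         ([] : List Int))
      else (st.1, st.2 ++ [PySem.List.pyGetD score i 0]))
    ((0 : Int), ([] : List Int))
  st.1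

-- ===== PORT B =====
def solution_alt (k : Int) (m : Int) (score : List Int) : Int :=
  -- score.sort(reverse=True); return m * sum(score[m-1::m])
  let score := PySem.List.sorted score (fun x => x) true
  -- slice? is none only for step m = 0, where Python raises (outside Pre_); .getD [] is unreachable under Pre_
  m * ((PySem.List.slice? score (some (m - 1)) none m).getD []).sum

-- ===== PRECONDITION & SPEC =====
-- Pre_ excludes m ≤ 0: for m = 0 A raises ZeroDivisionError on nonempty score (and B's zero-step slice raises
-- ValueError even on empty score), and for m < 0 A's negative-modulus grouping returns an accidental negative
-- total that B's strided slice does not reproduce.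
def Pre_solution (k : Int) (m : Int) (score : List Int) : Prop := 1 ≤ m
instance (k : Int) (m : Int) (score : List Int) : Decidable (Pre_solution k m score) := by
  unfold Pre_solution; infer_instance
def pvWitness_solution : Int × Int × List Int := (0, 2, [4, 1, 3, 2, 5])

def Spec_solution (k : Int) (m : Int) (score : List Int) (out : Int) : Prop := out = solution_alt k m score
instance (k : Int) (m : Int) (score : List Int) (out : Int) : Decidable (Spec_solution k m score out) := by
  unfold Spec_solution; infer_instance

-- ===== CLAIM (what is proved, stated in full; the proofs are below) =====
def Claim_equal_solution : Prop := ∀ (k : Int) (m : Int) (score : List Int),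
  Dom_solution k m score → Pre_solution k m score → Spec_solution k m score (solution k m score)

-- ===== LEMMAS AND PROOFS =====

-- A's loop, written structurally over the (sorted) list with an explicit position counter.
def aLoop (m : Int) : List Int → Int → List Int → Int → Int
  | [], a, _, _ => a
  | x :: xs, a, temp, pos =>
      if PySem.Int.mod (pos + 1) m = 0 then
        aLoop m xs (a + (PySem.List.min? (temp ++ [x]) (fun y => y)).getD 0 * m) [] (pos + 1)
      else aLoop m xs a (temp ++ [x]) (pos + 1)

-- Total of the group minima: on a descending list, the minimum of the current group (c elements
-- still to take) is its last element, at index c-1; then groups of size M follow.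
def chunkSum (M : Nat) (s : List Int) (c : Nat) : Int :=
  if h : s.length < c ∨ c = 0 then 0
  else s.getD (c - 1) 0 + chunkSum M (s.drop c) M
termination_by s.length
decreasing_by
  rw [not_or] at h
  have : 0 < c := Nat.pos_of_ne_zero h.2
  simp only [List.length_drop]; omega

lemma aLoop_nil (m : Int) (a : Int) (temp : List Int) (pos : Int) :
    aLoop m [] a temp pos = a := rfl

lemma aLoop_cons (m : Int) (x : Int) (xs : List Int) (a : Int) (temp : List Int) (pos : Int) :
    aLoop m (x :: xs) a temp pos =
      if PySem.Int.mod (pos + 1) m = 0 then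
        aLoop m xs (a + (PySem.List.min? (temp ++ [x]) (fun y => y)).getD 0 * m) [] (pos + 1)
      else aLoop m xs a (temp ++ [x]) (pos + 1) := rfl

lemma chunkSum_stop (M : Nat) (s : List Int) (c : Nat) (h : s.length < c ∨ c = 0) :
    chunkSum M s c = 0 := by
  rw [chunkSum]; exact dif_pos h

lemma chunkSum_step (M : Nat) (s : List Int) (c : Nat) (h : ¬(s.length < c ∨ c = 0)) :
    chunkSum M s c = s.getD (c - 1) 0 + chunkSum M (s.drop c) M := by
  rw [chunkSum]; exact dif_neg h

lemma chunkSum_cons (M : Nat) (x : Int) (xs : List Int) (c : Nat) (hc : 2 ≤ c) :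
    chunkSum M (x :: xs) c = chunkSum M xs (c - 1) := by
  by_cases hlen : xs.length < c - 1
  · rw [chunkSum_stop M (x :: xs) c (by left; simp only [List.length_cons]; omega),
        chunkSum_stop M xs (c - 1) (by left; exact hlen)]
  · rw [chunkSum_step M (x :: xs) c (by simp only [List.length_cons, not_or]; omega),
        chunkSum_step M xs (c - 1) (by simp only [not_or]; omega)]
    obtain ⟨c', rfl⟩ : ∃ c', c = c' + 2 := ⟨c - 2, by omega⟩
    simp [List.getD_cons_succ]

-- The indexed foldl of port A equals aLoop on the suffix not yet visited.
lemma fold_eq_aLoop (m : Int) (s : List Int) :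
    ∀ (suf : List Int) (pre : List Int), s = pre ++ suf → ∀ (a : Int) (temp : List Int),
    ((PySem.List.pyRange (pre.length : Int) (s.length : Int) 1).foldl
      (fun (st : Int × List Int) i =>
        if PySem.Int.mod (i + 1) m = 0 then
          (st.1 + (PySem.List.min? (st.2 ++ [PySem.List.pyGetD s i 0]) (fun x => x)).getD 0 * m,
           ([] : List Int))
        else (st.1, st.2 ++ [PySem.List.pyGetD s i 0])) (a, temp)).1
      = aLoop m suf a temp (pre.length : Int) := by
  intro suf
  induction suf with
  | nil =>
      intro pre hs a temp
      rw [PySem.List.pyRange_one_eq_nil (by simp [hs])]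
      simp [aLoop_nil]
  | cons x xs ih =>
      intro pre hs a temp
      have hlt : (pre.length : Int) < (s.length : Int) := by
        rw [hs]; push_cast [List.length_append, List.length_cons]; omega
      rw [PySem.List.pyRange_one_cons hlt]
      have hget : PySem.List.pyGetD s (pre.length : Int) 0 = x := by
        rw [PySem.List.pyGetD_natCast, hs]
        simp [List.getD_eq_getElem?_getD]
      simp only [List.foldl_cons, hget]
      rw [aLoop_cons]
      by_cases hc : PySem.Int.mod ((pre.length : Int) + 1) m = 0
      · rw [if_pos hc, if_pos hc]
        have := ih (pre ++ [x]) (by simp [hs])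
          (a + (PySem.List.min? (temp ++ [x]) (fun y => y)).getD 0 * m) []
        simpa using this
      · rw [if_neg hc, if_neg hc]
        have := ih (pre ++ [x]) (by simp [hs]) a (temp ++ [x])
        simpa using this

-- min of a list whose earlier elements all dominate the freshly appended one.
lemma min_append_last (temp : List Int) (x : Int) (h : ∀ t ∈ temp, x ≤ t) :
    (PySem.List.min? (temp ++ [x]) (fun y => y)).getD 0 = x := by
  obtain ⟨v, hv⟩ : ∃ v, PySem.List.min? (temp ++ [x]) (fun y => y) = some v := by
    cases hm : PySem.List.min? (temp ++ [x]) (fun y => y) with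
    | none => exact absurd hm (by simp [PySem.List.min?_eq_none_iff])
    | some v => exact ⟨v, rfl⟩
  have hmem := PySem.List.min?_mem hv
  have hmin := PySem.List.min?_isMin hv x (by simp)
  have : v = x := by
    rcases List.mem_append.mp hmem with ht | hx
    · exact le_antisymm hmin (h v ht)
    · simpa using hx
  simp [hv, this]

-- Main A-side invariant: with c elements left in the current group and everything already buffered
-- dominating the rest of the descending list, aLoop adds m times the remaining group minima.
lemma aLoop_eq_chunkSum (m : Int) (hm : 1 ≤ m) :
    ∀ (s : List Int) (c : Nat) (a : Int) (temp : List Int) (pos : Int),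
    List.Pairwise (fun p q => q ≤ p) s →
    (∀ t ∈ temp, ∀ y ∈ s, y ≤ t) →
    1 ≤ c → (c : Int) ≤ m → PySem.Int.mod (pos + c) m = 0 →
    aLoop m s a temp pos = a + m * chunkSum m.toNat s c := by
  intro s
  induction s with
  | nil =>
      intro c a temp pos _ _ hc _ _
      rw [aLoop_nil, chunkSum_stop _ _ _ (by left; simpa using hc)]
      ring
  | cons x xs ih =>
      intro c a temp pos hsort htemp hc hcm hmod
      have hxs : List.Pairwise (fun p q => q ≤ p) xs := hsort.of_cons
      have hx_ge : ∀ y ∈ xs, y ≤ x := fun y hy => List.rel_of_pairwise_cons hsort hy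
      have hdvd : m ∣ pos + c := (PySem.Int.mod_eq_zero_iff_dvd _ _).mp hmod
      rw [aLoop_cons]
      by_cases h1 : c = 1
      · subst h1
        have hcond : PySem.Int.mod (pos + 1) m = 0 := by simpa using hmod
        rw [if_pos hcond]
        rw [min_append_last temp x (fun t ht => htemp t ht x (by simp))]
        have hmM : ((m.toNat : Nat) : Int) = m := Int.toNat_of_nonneg (by omega)
        have hmod' : PySem.Int.mod (pos + 1 + ((m.toNat : Nat) : Int)) m = 0 := by
          rw [PySem.Int.mod_eq_zero_iff_dvd, hmM]
          exact Dvd.dvd.add (by simpa using hdvd) ⟨1, by ring⟩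
        rw [ih m.toNat (a + x * m) [] (pos + 1) hxs (by simp) (by omega) (by omega) hmod']
        rw [chunkSum_step m.toNat (x :: xs) 1 (by simp only [List.length_cons, not_or]; omega)]
        simp only [show (1:Nat) - 1 = 0 from rfl, List.getD_cons_zero, List.drop_succ_cons, List.drop_zero]
        ring
      · have hc2 : 2 ≤ c := by omega
        have hcond : PySem.Int.mod (pos + 1) m ≠ 0 := by
          intro hd
          rw [PySem.Int.mod_eq_zero_iff_dvd] at hd
          have hdc : m ∣ (c : Int) - 1 := by
            have h' := Int.dvd_sub hdvd hd
            have heq : pos + (c : Int) - (pos + 1) = (c : Int) - 1 := by ring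
            rwa [heq] at h'
          have hle := Int.le_of_dvd (by omega) hdc
          omega
        rw [if_neg hcond]
        have htemp' : ∀ t ∈ temp ++ [x], ∀ y ∈ xs, y ≤ t := by
          intro t ht y hy
          rcases List.mem_append.mp ht with h | h
          · exact htemp t h y (List.mem_cons_of_mem _ hy)
          · simp at h; subst h; exact hx_ge y hy
        have hmod' : PySem.Int.mod (pos + 1 + ((c - 1 : Nat) : Int)) m = 0 := by
          have heq : pos + 1 + ((c - 1 : Nat) : Int) = pos + c := by omega
          rw [heq]; exact hmod
        rw [ih (c - 1) a (temp ++ [x]) (pos + 1) hxs htemp' (by omega) (by omega) hmod']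
        rw [chunkSum_cons _ _ _ _ hc2]

-- B side: the strided slice s[M-1::M] is the list of group-boundary elements.
lemma slice_char (M : Nat) (hM : 1 ≤ M) (s : List Int) :
    (PySem.List.slice? s (some ((M : Int) - 1)) none (M : Int)).getD [] =
      (List.range (s.length / M)).map (fun kk => s.getD ((M - 1) + M * kk) 0) := by
  have hMpos : (0:Int) < (M:Int) := by exact_mod_cast hM
  have hstep : ¬((M:Int) = 0) := by omega
  simp only [PySem.List.slice?, PySem.List.sliceIndices]
  rw [if_neg hstep]
  simp only [if_neg (show ¬((M:Int) < 0) from by omega),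
             if_neg (show ¬((M:Int) - 1 < 0) from by omega)]
  rw [if_pos hMpos, Option.getD_some]
  by_cases hcase : s.length < M
  · have hmin : min ((M:Int) - 1) (s.length:Int) = (s.length:Int) := by
      rw [min_eq_right]; omega
    rw [hmin, if_neg (lt_irrefl _), Nat.div_eq_of_lt hcase]
    simp
  · rw [not_lt] at hcase
    have hmin : min ((M:Int) - 1) (s.length:Int) = (M:Int) - 1 := by
      rw [min_eq_left]; omega
    rw [hmin, if_pos (by omega)]
    have hcnt : (((s.length:Int) - ((M:Int) - 1) + (M:Int) - 1) / (M:Int)).toNat = s.length / M := by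
      have h1 : ((s.length:Int) - ((M:Int) - 1) + (M:Int) - 1) = (s.length:Int) := by ring
      rw [h1, ← Int.natCast_div, Int.toNat_natCast]
    rw [hcnt]
    have hfm : ∀ k ∈ List.range (s.length / M),
        (fun x => s[((M:Int) - 1 + (M:Int) * (x:Int)).toNat]?) k
          = some (s.getD ((M - 1) + M * k) 0) := by
      intro k hk
      rw [List.mem_range] at hk
      have hidx : ((M:Int) - 1 + (M:Int) * (k:Int)).toNat = (M - 1) + M * k := by
        have hc : ((M:Int) - 1 + (M:Int) * (k:Int)) = (((M - 1) + M * k : Nat) : Int) := by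
          rw [Nat.cast_add, Nat.cast_sub hM, Nat.cast_mul]; simp
        rw [hc, Int.toNat_natCast]
      have h2 : M * k + M ≤ M * (s.length / M) := by
        rw [← Nat.mul_succ]; exact Nat.mul_le_mul_left M hk
      have h3 : M * (s.length / M) ≤ s.length := by
        rw [Nat.mul_comm]; exact Nat.div_mul_le_self _ _
      have hlt : (M - 1) + M * k < s.length := by omega
      simp only [hidx]
      rw [List.getElem?_eq_getElem hlt, List.getD_eq_getElem s 0 hlt]
  
    rw [List.filterMap_congr hfm,
        show (fun k => some (s.getD ((M - 1) + M * k) 0))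
           = some ∘ (fun k => s.getD ((M - 1) + M * k) 0) from rfl,
        List.filterMap_eq_map]


-- and its sum is chunkSum.
lemma strided_sum (M : Nat) (hM : 1 ≤ M) :
    ∀ (n : Nat) (s : List Int), s.length = n →
    ((List.range (s.length / M)).map (fun kk => s.getD ((M - 1) + M * kk) 0)).sum
      = chunkSum M s M := by
  intro n
  induction n using Nat.strong_induction_on with
  | _ n ih =>
      intro s hn
      by_cases h : s.length < M
      · rw [Nat.div_eq_of_lt h, chunkSum_stop _ _ _ (by left; exact h)]
        simp
      · rw [not_lt] at h
        have hq : s.length / M = (s.length - M) / M + 1 := by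
          conv_lhs => rw [show s.length = (s.length - M) + M by omega]
          rw [Nat.add_div_right _ (by omega)]
        rw [hq, List.range_succ_eq_map]
        rw [List.map_cons, List.map_map, List.sum_cons]
        rw [chunkSum_step M s M (by simp only [not_or]; omega)]
        simp only [Nat.mul_zero, Nat.add_zero]
        have hmap : ((List.range ((s.length - M) / M)).map
              ((fun kk => s.getD ((M - 1) + M * kk) 0) ∘ Nat.succ)) =
            (List.range ((s.length - M) / M)).map
              (fun kk => (s.drop M).getD ((M - 1) + M * kk) 0) := by
          apply List.map_congr_left
          intro kk _
          simp only [Function.comp_apply]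
          have hidx : (M - 1) + M * Nat.succ kk = M + ((M - 1) + M * kk) := by
            rw [Nat.mul_succ]; omega
          rw [List.getD_eq_getElem?_getD, List.getD_eq_getElem?_getD, List.getElem?_drop, hidx]
        rw [hmap]
        have hih := ih (s.length - M) (by omega) (s.drop M) (by rw [List.length_drop])
        rw [List.length_drop] at hih
        rw [hih]

-- ===== VERDICT (by name: the statement is the Claim_ definition above) =====
theorem solution_spec : Claim_equal_solution := by
  intro k m score _ hpre
  have hm : 1 ≤ m := hpre
  have hM : 1 ≤ m.toNat := by omega
  have hmM : ((m.toNat : Nat) : Int) = m := Int.toNat_of_nonneg (by omega)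
  unfold Spec_solution
  simp only [solution, solution_alt]
  set s := PySem.List.sorted score (fun x => x) true with hs
  have hsort : List.Pairwise (fun p q => q ≤ p) s := by
    simpa using PySem.List.sorted_pairwise_rev score (fun x => x)
  have hA := fold_eq_aLoop m s s [] rfl 0 []
  simp only [List.length_nil, Nat.cast_zero, List.nil_append] at hA
  rw [hA]
  have hmod : PySem.Int.mod ((0 : Int) + ((m.toNat : Nat) : Int)) m = 0 := by
    rw [PySem.Int.mod_eq_zero_iff_dvd, hmM]
    simpa using Dvd.intro 1 rfl
  rw [aLoop_eq_chunkSum m hm s m.toNat 0 [] 0 hsort (by simp) hM (by omega) hmod]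
  have hsl := slice_char m.toNat hM s
  rw [hmM] at hsl
  rw [hsl, strided_sum m.toNat hM s.length s rfl]
  ring
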